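-- pv_equiv track=rewrite | github.com/yunfanY-bot/CS440 | mp1/search.py | longer_visited
-- ===== SOURCE A (Python) =====
-- def longer_visited(cur_state, visited_state):
--     longer = True
--     visited = False
--     for each_state in visited_state:
--         if (each_state[1] == cur_state[1]):
--             visited = True #visited
--             if cur_state[0] < each_state[0]:
--                 longer = False #visited and shorter path found
--                 break
--     return visited&longer #not visited
-- ===== SOURCE B (Python) =====
-- def longer_visited(cur_state, visited_state):
--     # Sort entries by path cost, largest first; the first entry with a
--     # matching state carries the maximal matching cost, so it alone decides.
--     for cost, state in sorted(visited_state, key=lambda e: e[0], reverse=True):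
--         if state == cur_state[1]:
--             return cost <= cur_state[0]
--     return False
-- ===== Notes on version B (the rewrite author's own statement) =====
-- stated objective: alternative
-- what changed: Replaces the flag-and-break scan over the raw list by sort-then-first-match: sort entries by cost descending, then the first entry with a matching state decides (its cost is the maximal matching cost), returning cost <= cur_state[0], or False if no match is found.
import Mathlib
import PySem

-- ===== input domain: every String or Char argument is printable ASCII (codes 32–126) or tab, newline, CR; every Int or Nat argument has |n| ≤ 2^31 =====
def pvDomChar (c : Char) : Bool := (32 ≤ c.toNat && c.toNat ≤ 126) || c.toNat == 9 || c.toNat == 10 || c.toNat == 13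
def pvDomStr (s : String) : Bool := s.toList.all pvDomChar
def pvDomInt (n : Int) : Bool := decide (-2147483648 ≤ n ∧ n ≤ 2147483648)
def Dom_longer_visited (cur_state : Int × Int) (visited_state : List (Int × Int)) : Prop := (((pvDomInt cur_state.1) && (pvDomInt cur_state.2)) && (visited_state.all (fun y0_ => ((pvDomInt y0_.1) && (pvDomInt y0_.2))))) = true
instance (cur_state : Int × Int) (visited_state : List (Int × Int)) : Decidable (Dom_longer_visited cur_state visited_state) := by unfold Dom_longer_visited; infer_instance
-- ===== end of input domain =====

-- B replaces A's flag-and-break scan by sort-descending-then-first-match (objective: alternative).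


-- ===== PORT A =====
-- the for-loop with the `longer`/`visited` flags and the early `break`
def lvLoop (cur_state : Int × Int) : List (Int × Int) → Bool → Bool → Bool
  | [], longer, visited => visited && longer            -- return visited&longer
  | each_state :: rest, longer, visited =>
    if each_state.2 == cur_state.2 then
      if cur_state.1 < each_state.1 then
        true && false                                    -- break: visited=True, longer=False, return visited&longer
      else lvLoop cur_state rest longer true
    else lvLoop cur_state rest longer visited

def longer_visited (cur_state : Int × Int) (visited_state : List (Int × Int)) : Bool :=
  lvLoop cur_state visited_state true false

-- ===== PORT B =====
-- 'for cost, state in sorted(...): if state == cur_state[1]: return cost <= cur_state[0]' / 'return False'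
def lvFindLoop (cur_state : Int × Int) : List (Int × Int) → Bool
  | [] => false
  | (cost, state) :: rest =>
    if state == cur_state.2 then decide (cost ≤ cur_state.1)
    else lvFindLoop cur_state rest

def longer_visited_alt (cur_state : Int × Int) (visited_state : List (Int × Int)) : Bool :=
  lvFindLoop cur_state (PySem.List.sorted visited_state Prod.fst true)

-- ===== PRECONDITION & SPEC =====
def Spec_longer_visited (cur_state : Int × Int) (visited_state : List (Int × Int)) (out : Bool) : Prop := out = longer_visited_alt cur_state visited_state
instance (cur_state : Int × Int) (visited_state : List (Int × Int)) (out : Bool) : Decidable (Spec_longer_visited cur_state visited_state out) := by unfold Spec_longer_visited; infer_instance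

-- ===== CLAIM =====
def Claim_equal_longer_visited : Prop := ∀ (cur_state : Int × Int) (visited_state : List (Int × Int)), Dom_longer_visited cur_state visited_state → Spec_longer_visited cur_state visited_state (longer_visited cur_state visited_state)

-- ===== LEMMAS AND PROOFS =====

-- A's loop computes: "a match was seen (or the incoming flag)" AND "every match has cost ≤ cur_state.1"
theorem lvLoop_eq (cur : Int × Int) (vs : List (Int × Int)) (v : Bool) :
    lvLoop cur vs true v =
      ((v || vs.any (fun e => e.2 == cur.2)) &&
       vs.all (fun e => !(e.2 == cur.2) || decide (e.1 ≤ cur.1))) := by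
  induction vs generalizing v with
  | nil => simp [lvLoop]
  | cons e rest ih =>
    cases hb : (e.2 == cur.2) with
    | true =>
      by_cases hlt : cur.1 < e.1
      · simp [lvLoop, hb, hlt, not_le.mpr hlt]
      · simp [lvLoop, hb, hlt, ih, not_lt.mp hlt]
    | false => simp [lvLoop, hb, ih]

-- On a list whose costs are descending, B's first-match loop computes the same any/all characterisation
theorem lvFindLoop_eq (cur : Int × Int) (s : List (Int × Int))
    (hs : s.Pairwise (fun a b => b.1 ≤ a.1)) :
    lvFindLoop cur s =
      ((s.any (fun e => e.2 == cur.2)) &&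
       s.all (fun e => !(e.2 == cur.2) || decide (e.1 ≤ cur.1))) := by
  induction s with
  | nil => simp [lvFindLoop]
  | cons e rest ih =>
    obtain ⟨hhead, hrest⟩ := List.pairwise_cons.mp hs
    cases hb : (e.2 == cur.2) with
    | true =>
      by_cases hle : e.1 ≤ cur.1
      · have hall : rest.all (fun x => !(x.2 == cur.2) || decide (x.1 ≤ cur.1)) = true := by
          rw [List.all_eq_true]
          intro x hx
          cases hxb : (x.2 == cur.2) with
          | true => simp [le_trans (hhead x hx) hle]
          | false => simp
        simp [lvFindLoop, hb, hle, hall]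
      · simp [lvFindLoop, hb, hle]
    | false => simp [lvFindLoop, hb, ih hrest]

-- ===== VERDICT =====
theorem longer_visited_spec : Claim_equal_longer_visited := by
  intro cur vs _
  unfold Spec_longer_visited longer_visited longer_visited_alt
  have hperm : (PySem.List.sorted vs Prod.fst true).Perm vs := PySem.List.sorted_perm vs Prod.fst true
  rw [lvLoop_eq, lvFindLoop_eq cur _ (PySem.List.sorted_pairwise_rev vs Prod.fst),
    hperm.any_eq, hperm.all_eq]
  simp
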